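-- pv_equiv track=rewrite | github.com/Raymon1213/Reporte-Semanal-6- | Experimentacion.py | contar_subarreglos_topdown
-- ===== SOURCE A (Python) =====
-- def contar_subarreglos_topdown(n, p, q):
--     pos_p = [0] * (n + 2)  # +2 para incluir n+1
--     pos_q = [0] * (n + 2)
--     for i in range(n):
--         pos_p[p[i]] = i
--         pos_q[q[i]] = i
--     pos_p[n + 1] = n
--     pos_q[n + 1] = n
--
--     memoL, memoR, memoDP = {}, {}, {}
--
--     def L(x):
--         if x == 0: return 0
--         if x in memoL: return memoL[x]
--         if x == 1: res = min(pos_p[1], pos_q[1])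
--         else: res = min(L(x-1), pos_p[x], pos_q[x])
--         memoL[x] = res
--         return res
--
--     def R(x):
--         if x == 0: return n - 1
--         if x in memoR: return memoR[x]
--         if x == 1: res = max(pos_p[1], pos_q[1])
--         else: res = max(R(x-1), pos_p[x], pos_q[x])
--         memoR[x] = res
--         return res
--
--     def A(x):
--         l, r = L(x), R(x)
--         if l > r: return 0
--         return (l + 1) * (n - r)
--
--     def DP(x):
--         if x in memoDP: return memoDP[x]
--         if x == 1:
--             l1, r1 = min(pos_p[1], pos_q[1]), max(pos_p[1], pos_q[1])
--             left_count = l1 * (l1 + 1) // 2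
--             right_count = (n - r1 - 1) * (n - r1) // 2
--             mid_count = (r1 - l1 - 1) * (r1 - l1) // 2 if r1 > l1 + 1 else 0
--             res = left_count + right_count + mid_count
--         else:
--             l_prev, r_prev = L(x-1), R(x-1)
--             if l_prev > r_prev:
--                 res = 0
--             else:
--                 res = 0
--                 if x <= n:
--                     if pos_p[x] > r_prev and pos_q[x] > r_prev:
--                         res += (l_prev + 1) * (min(pos_p[x], pos_q[x]) - r_prev)
--                     if pos_p[x] < l_prev and pos_q[x] < l_prev:
--                         res += (l_prev - max(pos_p[x], pos_q[x])) * (n - r_prev)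
--                     if (pos_p[x] < l_prev and pos_q[x] > r_prev) or (pos_q[x] < l_prev and pos_p[x] > r_prev):
--                         left_part = l_prev - min(pos_p[x], pos_q[x])
--                         right_part = max(pos_p[x], pos_q[x]) - r_prev
--                         res += left_part * right_part
--                 else:
--                     res = A(n)
--         memoDP[x] = res
--         return res
--
--     total = 0
--     for x in range(1, n + 2):
--         total += DP(x)
--     return total
-- ===== SOURCE B (Python) =====
-- def contar_subarreglos_topdown(n, p, q):
--     pos_p = [0] * (n + 2)
--     pos_q = [0] * (n + 2)
--     for i in range(n):
--         pos_p[p[i]] = i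
--         pos_q[q[i]] = i
--     if n < 1:
--         return 0
--     l = min(pos_p[1], pos_q[1])
--     r = max(pos_p[1], pos_q[1])
--     total = l * (l + 1) // 2 + (n - r - 1) * (n - r) // 2
--     if r > l + 1:
--         total += (r - l - 1) * (r - l) // 2
--     for x in range(2, n + 1):
--         a, b = pos_p[x], pos_q[x]
--         lo, hi = min(a, b), max(a, b)
--         if l <= r:
--             if lo > r:
--                 total += (l + 1) * (lo - r)
--             if hi < l:
--                 total += (l - hi) * (n - r)
--             if lo < l and hi > r:
--                 total += (l - lo) * (hi - r)
--         l, r = min(l, lo), max(r, hi)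
--     if l <= r:
--         total += (l + 1) * (n - r)
--     return total
-- ===== Notes on version B (the rewrite author's own statement) =====
-- stated objective: alternative
-- what changed: Replaced A's three memoised recursive helpers (L, R, DP over memo dicts) and its driving loop by a single bottom-up forward pass that keeps only the running window (l, r) and the total; the position-array preprocessing is kept.
import Mathlib
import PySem

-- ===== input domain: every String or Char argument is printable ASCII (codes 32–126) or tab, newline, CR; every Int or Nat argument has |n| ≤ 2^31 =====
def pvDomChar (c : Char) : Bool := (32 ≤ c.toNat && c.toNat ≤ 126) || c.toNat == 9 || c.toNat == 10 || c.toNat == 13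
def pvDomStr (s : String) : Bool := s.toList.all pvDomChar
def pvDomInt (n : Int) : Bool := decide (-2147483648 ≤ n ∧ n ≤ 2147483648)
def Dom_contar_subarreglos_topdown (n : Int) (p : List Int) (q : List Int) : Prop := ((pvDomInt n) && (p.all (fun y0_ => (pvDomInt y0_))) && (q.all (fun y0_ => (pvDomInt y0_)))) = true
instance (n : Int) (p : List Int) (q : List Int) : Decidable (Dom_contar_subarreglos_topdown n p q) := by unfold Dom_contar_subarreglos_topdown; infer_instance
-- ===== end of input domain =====

-- B replaces A's three memoised recursive helpers (L, R, DP over memo dicts) by one bottom-up forward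
-- pass keeping only the running window (l, r) and the total; the position-array preprocessing is shared.

-- ===== PORT A =====
-- pos = [0]*(n+2); for i in range(n): pos[xs[i]] = i; pos[n+1] = n.
-- pySetD/pyGetD are the total forms of Python's item assignment/subscript (negative indices wrap);
-- exact under Pre_ (every index in range).
def pvBuildPos (n : Int) (xs : List Int) : List Int :=
  let arr := (PySem.List.pyRange 0 n 1).foldl
    (fun arr i => PySem.List.pySetD arr (PySem.List.pyGetD xs i 0) i)
    (List.replicate (n + 2).toNat 0)
  PySem.List.pySetD arr (n + 1) n

-- L(x); the memo dict is pure caching (same values), elided.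
def pvL (pp qq : List Int) : Nat → Int
  | 0 => 0
  | 1 => min (PySem.List.pyGetD pp 1 0) (PySem.List.pyGetD qq 1 0)
  | (x + 2) => min (min (pvL pp qq (x + 1)) (PySem.List.pyGetD pp ((x : Int) + 2) 0))
      (PySem.List.pyGetD qq ((x : Int) + 2) 0)

-- R(x); memo elided likewise.
def pvR (n : Int) (pp qq : List Int) : Nat → Int
  | 0 => n - 1
  | 1 => max (PySem.List.pyGetD pp 1 0) (PySem.List.pyGetD qq 1 0)
  | (x + 2) => max (max (pvR n pp qq (x + 1)) (PySem.List.pyGetD pp ((x : Int) + 2) 0))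
      (PySem.List.pyGetD qq ((x : Int) + 2) 0)

def pvA (n : Int) (pp qq : List Int) (x : Nat) : Int :=
  let l := pvL pp qq x
  let r := pvR n pp qq x
  if l > r then 0 else (l + 1) * (n - r)

-- DP(x); the 'res += …' chain is the sum of the three guarded terms. Python never calls DP(0).
def pvDP (n : Int) (pp qq : List Int) : Nat → Int
  | 0 => 0
  | 1 =>
    let l1 := min (PySem.List.pyGetD pp 1 0) (PySem.List.pyGetD qq 1 0)
    let r1 := max (PySem.List.pyGetD pp 1 0) (PySem.List.pyGetD qq 1 0)
    let left_count := PySem.Int.floordiv (l1 * (l1 + 1)) 2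
    let right_count := PySem.Int.floordiv ((n - r1 - 1) * (n - r1)) 2
    let mid_count := if r1 > l1 + 1 then PySem.Int.floordiv ((r1 - l1 - 1) * (r1 - l1)) 2 else 0
    left_count + right_count + mid_count
  | (x + 2) =>
    let l_prev := pvL pp qq (x + 1)
    let r_prev := pvR n pp qq (x + 1)
    if l_prev > r_prev then 0
    else if ((x : Int) + 2) ≤ n then
      let a := PySem.List.pyGetD pp ((x : Int) + 2) 0
      let b := PySem.List.pyGetD qq ((x : Int) + 2) 0
      (if a > r_prev ∧ b > r_prev then (l_prev + 1) * (min a b - r_prev) else 0)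
      + (if a < l_prev ∧ b < l_prev then (l_prev - max a b) * (n - r_prev) else 0)
      + (if (a < l_prev ∧ b > r_prev) ∨ (b < l_prev ∧ a > r_prev)
          then (l_prev - min a b) * (max a b - r_prev) else 0)
    else pvA n pp qq n.toNat

def contar_subarreglos_topdown (n : Int) (p : List Int) (q : List Int) : Int :=
  let pp := pvBuildPos n p
  let qq := pvBuildPos n q
  (PySem.List.pyRange 1 (n + 2) 1).foldl (fun total x => total + pvDP n pp qq x.toNat) 0

-- ===== PORT B =====
-- B's position preprocessing: pos = [0]*(n+2); for i in range(n): pos[xs[i]] = i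
-- (same loop as A's, without A's dead write pos[n+1] = n).
def pvBuildPosB (n : Int) (xs : List Int) : List Int :=
  (PySem.List.pyRange 0 n 1).foldl
    (fun arr i => PySem.List.pySetD arr (PySem.List.pyGetD xs i 0) i)
    (List.replicate (n + 2).toNat 0)

-- one iteration of B's loop over x = 2..n on the state (l, r, total)
def pvStep (n : Int) (dp dq : List Int) (st : Int × Int × Int) (x : Int) : Int × Int × Int :=
  let l := st.1
  let r := st.2.1
  let a := PySem.List.pyGetD dp x 0
  let b := PySem.List.pyGetD dq x 0
  let lo := min a b
  let hi := max a b
  let total :=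
    if l ≤ r then
      st.2.2 + (if lo > r then (l + 1) * (lo - r) else 0)
             + (if hi < l then (l - hi) * (n - r) else 0)
             + (if lo < l ∧ hi > r then (l - lo) * (hi - r) else 0)
    else st.2.2
  (min l lo, max r hi, total)

def contar_subarreglos_topdown_alt (n : Int) (p : List Int) (q : List Int) : Int :=
  let pos_p := pvBuildPosB n p
  let pos_q := pvBuildPosB n q
  if n < 1 then 0
  else
    let l0 := min (PySem.List.pyGetD pos_p 1 0) (PySem.List.pyGetD pos_q 1 0)
    let r0 := max (PySem.List.pyGetD pos_p 1 0) (PySem.List.pyGetD pos_q 1 0)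
    let t0 := PySem.Int.floordiv (l0 * (l0 + 1)) 2 + PySem.Int.floordiv ((n - r0 - 1) * (n - r0)) 2
    let t1 := if r0 > l0 + 1 then t0 + PySem.Int.floordiv ((r0 - l0 - 1) * (r0 - l0)) 2 else t0
    let st := (PySem.List.pyRange 2 (n + 1) 1).foldl (pvStep n pos_p pos_q) (l0, r0, t1)
    if st.1 ≤ st.2.1 then st.2.2 + (st.1 + 1) * (n - st.2.1) else st.2.2

-- ===== PRECONDITION & SPEC =====
-- Exactly the inputs on which the Python A returns normally: n ≥ -1 (for n ≤ -2 the write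
-- pos[n+1] = n hits the empty array), both lists long enough, and every read value a valid
-- index into the (n+2)-slot position arrays.
def Pre_contar_subarreglos_topdown (n : Int) (p : List Int) (q : List Int) : Prop :=
  -1 ≤ n ∧ n ≤ (p.length : Int) ∧ n ≤ (q.length : Int) ∧
  (∀ v ∈ p.take n.toNat, -(n + 2) ≤ v ∧ v ≤ n + 1) ∧
  (∀ v ∈ q.take n.toNat, -(n + 2) ≤ v ∧ v ≤ n + 1)

instance (n : Int) (p : List Int) (q : List Int) : Decidable (Pre_contar_subarreglos_topdown n p q) := by
  unfold Pre_contar_subarreglos_topdown; infer_instance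

def pvWitness_contar_subarreglos_topdown : Int × List Int × List Int := (3, [2, 1, 3], [1, 3, 2])

def Spec_contar_subarreglos_topdown (n : Int) (p : List Int) (q : List Int) (out : Int) : Prop :=
  out = contar_subarreglos_topdown_alt n p q

instance (n : Int) (p : List Int) (q : List Int) (out : Int) :
    Decidable (Spec_contar_subarreglos_topdown n p q out) := by
  unfold Spec_contar_subarreglos_topdown; infer_instance

-- ===== CLAIM (what is proved, stated in full; the proofs are below) =====
def Claim_equal_contar_subarreglos_topdown : Prop :=
  ∀ (n : Int) (p : List Int) (q : List Int), Dom_contar_subarreglos_topdown n p q →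
    Pre_contar_subarreglos_topdown n p q →
    Spec_contar_subarreglos_topdown n p q (contar_subarreglos_topdown n p q)

-- ===== LEMMAS AND PROOFS =====

-- per-x contribution: B's lo/hi-form branch sum equals A's three-branch DP body
theorem pv_contrib (n l r a b t : Int) :
    (if l ≤ r then
       t + (if min a b > r then (l + 1) * (min a b - r) else 0)
         + (if max a b < l then (l - max a b) * (n - r) else 0)
         + (if min a b < l ∧ max a b > r then (l - min a b) * (max a b - r) else 0)
     else t)
    = t + (if l > r then 0 else
        (if a > r ∧ b > r then (l + 1) * (min a b - r) else 0)
        + (if a < l ∧ b < l then (l - max a b) * (n - r) else 0)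
        + (if (a < l ∧ b > r) ∨ (b < l ∧ a > r) then (l - min a b) * (max a b - r) else 0)) := by
  by_cases hlr : l ≤ r
  · have e1 : (min a b > r) ↔ (a > r ∧ b > r) := by omega
    have e2 : (max a b < l) ↔ (a < l ∧ b < l) := by omega
    have e3 : (min a b < l ∧ max a b > r) ↔ ((a < l ∧ b > r) ∨ (b < l ∧ a > r)) := by omega
    rw [if_pos hlr, if_neg (by omega : ¬ l > r)]
    simp only [e1, e2, e3]
    ring
  · rw [if_neg hlr, if_pos (by omega : l > r)]
    ring

-- pointwise get-after-set on nonnegative Int indices (write index in range)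
theorem pv_getD_setD_int (arr : List Int) (i k v : Int) (h0 : 0 ≤ i) (h1 : i < (arr.length : Int))
    (hk : 0 ≤ k) :
    PySem.List.pyGetD (PySem.List.pySetD arr i v) k 0 = if k = i then v else PySem.List.pyGetD arr k 0 := by
  rw [PySem.List.pySetD_of_nonneg arr v h0]
  by_cases hlt : k < (arr.length : Int)
  · rw [PySem.List.pyGetD_eq_getElem _ _ hk (by simpa using hlt),
        PySem.List.pyGetD_eq_getElem _ _ hk hlt]
    rw [List.getElem_set]
    split_ifs with h1' h2' h3' <;> first | rfl | (exfalso; omega)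
  · have hA : PySem.List.pyGet? (arr.set i.toNat v) k = none := by
      rw [PySem.List.pyGet?_eq_none_iff]
      simp only [PySem.Raise.InRange, List.length_set]
      omega
    have hB : PySem.List.pyGet? arr k = none := by
      rw [PySem.List.pyGet?_eq_none_iff]
      simp only [PySem.Raise.InRange]
      omega
    rw [PySem.List.pyGetD_of_none _ _ _ hA, PySem.List.pyGetD_of_none _ _ _ hB,
        if_neg (by omega)]

-- the position-building fold preserves the array length
theorem pv_foldl_length (xs : List Int) (l : List Int) :
    ∀ arr : List Int,
      (l.foldl (fun arr i => PySem.List.pySetD arr (PySem.List.pyGetD xs i 0) i) arr).length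
        = arr.length := by
  induction l with
  | nil => intro arr; rfl
  | cons x l ih =>
    intro arr
    simp only [List.foldl_cons]
    rw [ih, PySem.List.length_pySetD]

-- A's position array and B's agree on every slot 1..n (A's extra write hits slot n+1 only)
theorem pv_pos_agree (n : Int) (xs : List Int) (hn : -1 ≤ n) :
    ∀ k : Int, 1 ≤ k → k ≤ n →
      PySem.List.pyGetD (pvBuildPos n xs) k 0 = PySem.List.pyGetD (pvBuildPosB n xs) k 0 := by
  intro k hk1 hk2
  have hlen : ((pvBuildPosB n xs).length : Int) = n + 2 := by
    unfold pvBuildPosB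
    rw [pv_foldl_length]
    simp only [List.length_replicate]
    omega
  have hAB : pvBuildPos n xs = PySem.List.pySetD (pvBuildPosB n xs) (n + 1) n := rfl
  rw [hAB, pv_getD_setD_int _ _ _ _ (by omega) (by omega) (by omega), if_neg (by omega)]

-- unfolding equation for DP(x) at x = k+2 (cited by instance, so the driving map stays folded)
theorem pvDP_succ (n : Int) (pp qq : List Int) (k : Nat) :
    pvDP n pp qq (k + 2)
    = if pvL pp qq (k + 1) > pvR n pp qq (k + 1) then 0
      else if ((k : Int) + 2) ≤ n then
        (if PySem.List.pyGetD pp ((k : Int) + 2) 0 > pvR n pp qq (k + 1) ∧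
            PySem.List.pyGetD qq ((k : Int) + 2) 0 > pvR n pp qq (k + 1)
          then (pvL pp qq (k + 1) + 1) *
            (min (PySem.List.pyGetD pp ((k : Int) + 2) 0) (PySem.List.pyGetD qq ((k : Int) + 2) 0)
              - pvR n pp qq (k + 1)) else 0)
        + (if PySem.List.pyGetD pp ((k : Int) + 2) 0 < pvL pp qq (k + 1) ∧
              PySem.List.pyGetD qq ((k : Int) + 2) 0 < pvL pp qq (k + 1)
            then (pvL pp qq (k + 1) -
              max (PySem.List.pyGetD pp ((k : Int) + 2) 0) (PySem.List.pyGetD qq ((k : Int) + 2) 0))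
              * (n - pvR n pp qq (k + 1)) else 0)
        + (if (PySem.List.pyGetD pp ((k : Int) + 2) 0 < pvL pp qq (k + 1) ∧
               PySem.List.pyGetD qq ((k : Int) + 2) 0 > pvR n pp qq (k + 1)) ∨
              (PySem.List.pyGetD qq ((k : Int) + 2) 0 < pvL pp qq (k + 1) ∧
               PySem.List.pyGetD pp ((k : Int) + 2) 0 > pvR n pp qq (k + 1))
            then (pvL pp qq (k + 1) -
              min (PySem.List.pyGetD pp ((k : Int) + 2) 0) (PySem.List.pyGetD qq ((k : Int) + 2) 0))
              * (max (PySem.List.pyGetD pp ((k : Int) + 2) 0) (PySem.List.pyGetD qq ((k : Int) + 2) 0)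
                - pvR n pp qq (k + 1)) else 0)
      else pvA n pp qq n.toNat := rfl

-- B's loop over x = 2..m+1 carries exactly (L(m), R(m), t1 + Σ DP(x))
theorem pv_loop (n : Int) (pp qq : List Int) (dp dq : List Int)
    (hP : ∀ x : Int, 1 ≤ x → x ≤ n → PySem.List.pyGetD dp x 0 = PySem.List.pyGetD pp x 0)
    (hQ : ∀ x : Int, 1 ≤ x → x ≤ n → PySem.List.pyGetD dq x 0 = PySem.List.pyGetD qq x 0)
    (t1 : Int) (k : Nat) (hk : (k : Int) + 1 ≤ n) :
    (PySem.List.pyRange 2 ((k : Int) + 2) 1).foldl (pvStep n dp dq) (pvL pp qq 1, pvR n pp qq 1, t1)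
    = (pvL pp qq (k + 1), pvR n pp qq (k + 1),
       t1 + ((PySem.List.pyRange 2 ((k : Int) + 2) 1).map
          (fun x => pvDP n pp qq x.toNat)).sum) := by
  induction k with
  | zero =>
    rw [PySem.List.pyRange_one_eq_nil (by omega)]
    simp
  | succ k ih =>
    have hsplit : PySem.List.pyRange 2 ((k + 1 : Nat) + 2 : Int) 1
        = PySem.List.pyRange 2 ((k : Int) + 2) 1 ++ [(k : Int) + 2] := by
      have h2 : ((k + 1 : Nat) + 2 : Int) = ((k : Int) + 2) + 1 := by push_cast; ring
      rw [h2]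
      exact PySem.List.pyRange_one_succ_right (by omega)
    rw [hsplit, List.foldl_append, List.map_append, List.sum_append,
        ih (by push_cast at hk ⊢; omega)]
    simp only [List.foldl_cons, List.foldl_nil, List.map_cons, List.map_nil, List.sum_cons,
      List.sum_nil, add_zero]
    have hx1 : (1 : Int) ≤ (k : Int) + 2 := by omega
    have hx2 : (k : Int) + 2 ≤ n := by push_cast at hk; omega
    have ha := hP ((k : Int) + 2) hx1 hx2
    have hb := hQ ((k : Int) + 2) hx1 hx2
    have htn : ((k : Int) + 2).toNat = k + 2 := by omega
    unfold pvStep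
    simp only [ha, hb, htn]
    refine Prod.ext ?_ (Prod.ext ?_ ?_)
    · show min (pvL pp qq (k + 1))
        (min (PySem.List.pyGetD pp ((k : Int) + 2) 0) (PySem.List.pyGetD qq ((k : Int) + 2) 0))
        = pvL pp qq (k + 2)
      simp only [pvL]
      rw [min_assoc]
    · show max (pvR n pp qq (k + 1))
        (max (PySem.List.pyGetD pp ((k : Int) + 2) 0) (PySem.List.pyGetD qq ((k : Int) + 2) 0))
        = pvR n pp qq (k + 2)
      simp only [pvR]
      rw [max_assoc]
    · show _ = t1 + (_ + pvDP n pp qq (k + 2))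
      rw [pvDP_succ, if_pos hx2]
      rw [pv_contrib n (pvL pp qq (k + 1)) (pvR n pp qq (k + 1))
          (PySem.List.pyGetD pp ((k : Int) + 2) 0) (PySem.List.pyGetD qq ((k : Int) + 2) 0)
          (t1 + ((PySem.List.pyRange 2 ((k : Int) + 2) 1).map
            (fun x => pvDP n pp qq x.toNat)).sum)]
      ring

-- B's first term equals DP(1)
theorem pv_first (n : Int) (pp qq : List Int) (l0 r0 : Int)
    (hl0 : l0 = min (PySem.List.pyGetD pp 1 0) (PySem.List.pyGetD qq 1 0))
    (hr0 : r0 = max (PySem.List.pyGetD pp 1 0) (PySem.List.pyGetD qq 1 0)) :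
    (if r0 > l0 + 1 then
       (PySem.Int.floordiv (l0 * (l0 + 1)) 2 + PySem.Int.floordiv ((n - r0 - 1) * (n - r0)) 2)
         + PySem.Int.floordiv ((r0 - l0 - 1) * (r0 - l0)) 2
     else PySem.Int.floordiv (l0 * (l0 + 1)) 2 + PySem.Int.floordiv ((n - r0 - 1) * (n - r0)) 2)
    = pvDP n pp qq 1 := by
  simp only [pvDP, ← hl0, ← hr0]
  split_ifs <;> ring

-- ===== VERDICT (by name: the statement is the Claim_ definition above) =====
theorem contar_subarreglos_topdown_spec : Claim_equal_contar_subarreglos_topdown := by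
  intro n p q hdom hpre
  obtain ⟨hn, hlp, hlq, hvp, hvq⟩ := hpre
  unfold Spec_contar_subarreglos_topdown
  have hcase : n = -1 ∨ n = 0 ∨ 1 ≤ n := by omega
  rcases hcase with hz | hz | hpos
  · -- n = -1: A's driving range 1..n+1 is empty, B returns 0 at the guard.
    subst hz
    simp only [contar_subarreglos_topdown, contar_subarreglos_topdown_alt]
    rw [if_pos (by omega : (-1 : Int) < 1)]
    rw [show (-1 : Int) + 2 = 1 by ring, PySem.List.pyRange_one_eq_nil (le_refl 1)]
    rfl
  · -- n = 0: A computes DP(1) over the all-zero position arrays, which is 0; B returns 0.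
    have hpp : ∀ xs : List Int, pvBuildPos (0 : Int) xs = [0, 0] := by
      intro xs
      unfold pvBuildPos
      rw [PySem.List.pyRange_one_eq_nil (le_refl 0)]
      simp only [List.foldl_nil]
      decide
    subst hz
    simp only [contar_subarreglos_topdown, contar_subarreglos_topdown_alt, hpp]
    norm_num
    decide
  · -- 1 ≤ n
    have hP := pv_pos_agree n p (by omega)
    have hQ := pv_pos_agree n q (by omega)
    simp only [contar_subarreglos_topdown, contar_subarreglos_topdown_alt]
    rw [if_neg (by omega : ¬ n < 1)]
    -- rewrite B's array lookups at slot 1 into A's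
    rw [← hP 1 (by omega) (by omega), ← hQ 1 (by omega) (by omega)]
    -- decompose A's driving range: [1] ++ [2..n] ++ [n+1]
    have hsplitA : PySem.List.pyRange 1 (n + 2) 1
        = 1 :: (PySem.List.pyRange 2 (n + 1) 1 ++ [n + 1]) := by
      have h1 : n + 2 = (n + 1) + 1 := by ring
      rw [h1, PySem.List.pyRange_one_succ_right (by omega : (1 : Int) ≤ n + 1),
          PySem.List.pyRange_one_cons (by omega : (1 : Int) < n + 1)]
      norm_num
    rw [hsplitA]
    simp only [List.foldl_cons, List.foldl_append, List.foldl_nil]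
    rw [show ((1 : Int).toNat) = 1 from rfl, zero_add]
    rw [PySem.List.foldl_add]
    -- B's initial state is (L(1), R(1), DP(1))
    have hL1 : min (PySem.List.pyGetD (pvBuildPos n p) 1 0) (PySem.List.pyGetD (pvBuildPos n q) 1 0)
        = pvL (pvBuildPos n p) (pvBuildPos n q) 1 := rfl
    have hR1 : max (PySem.List.pyGetD (pvBuildPos n p) 1 0) (PySem.List.pyGetD (pvBuildPos n q) 1 0)
        = pvR n (pvBuildPos n p) (pvBuildPos n q) 1 := rfl
    rw [hL1, hR1, pv_first n (pvBuildPos n p) (pvBuildPos n q) _ _ hL1.symm hR1.symm]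
    -- run the loop
    set k : Nat := n.toNat - 1 with hkdef
    have hkc : ((k : Nat) : Int) + 2 = n + 1 := by omega
    have hk1 : k + 1 = n.toNat := by omega
    rw [show PySem.List.pyRange 2 (n + 1) 1 = PySem.List.pyRange 2 ((k : Int) + 2) 1 by rw [hkc]]
    rw [pv_loop n (pvBuildPos n p) (pvBuildPos n q) (pvBuildPosB n p) (pvBuildPosB n q)
        (fun x h1 h2 => (hP x h1 h2).symm) (fun x h1 h2 => (hQ x h1 h2).symm)
        (pvDP n (pvBuildPos n p) (pvBuildPos n q) 1) k (by omega)]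
    dsimp only
    -- A's last term DP(n+1) is the guarded A(n)
    have htn : (n + 1).toNat = k + 2 := by omega
    rw [htn, pvDP_succ, if_neg (by omega : ¬ ((k : Int) + 2) ≤ n), hk1]
    simp only [pvA]
    rw [show n.toNat = k + 1 from hk1.symm]
    generalize pvL (pvBuildPos n p) (pvBuildPos n q) (k + 1) = lv
    generalize pvR n (pvBuildPos n p) (pvBuildPos n q) (k + 1) = rv
    split_ifs <;> first | ring1 | (exfalso; omega)
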